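-- pv_equiv track=rewrite | github.com/YevhenMix/courses | Python Pro/Лекция 5. Перегрузка операторов/Lection_5_tsk_2.py | whole_part
-- ===== SOURCE A (Python) =====
-- def whole_part(nominator, denominator):
--     i = 0
--     while True:
--         if not nominator % denominator:
--             part = nominator // denominator
--             return part, i, denominator
--         i += 1
--         nominator -= 1
-- ===== SOURCE B (Python) =====
-- def whole_part(nominator, denominator):
--     i = nominator % abs(denominator)
--     return (nominator - i) // denominator, i, denominator
-- ===== Notes on version B (the rewrite author's own statement) =====
-- stated objective: faster
-- what changed: Replaces the decrement-until-divisible loop (one modulo test per step) with a closed form: i = nominator % abs(denominator) and the quotient of the lowered numerator, computed in O(1).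
import Mathlib
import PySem

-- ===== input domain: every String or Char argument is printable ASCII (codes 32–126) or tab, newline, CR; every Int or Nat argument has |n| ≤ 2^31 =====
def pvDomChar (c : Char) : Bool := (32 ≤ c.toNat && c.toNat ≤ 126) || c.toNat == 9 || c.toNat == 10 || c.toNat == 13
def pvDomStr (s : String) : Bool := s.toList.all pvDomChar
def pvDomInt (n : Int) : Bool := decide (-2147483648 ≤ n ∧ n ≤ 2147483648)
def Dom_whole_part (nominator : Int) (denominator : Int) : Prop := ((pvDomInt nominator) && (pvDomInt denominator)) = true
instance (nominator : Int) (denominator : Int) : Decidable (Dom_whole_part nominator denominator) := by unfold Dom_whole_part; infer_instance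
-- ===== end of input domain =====

-- B replaces A's decrement-until-divisible loop by the closed form i = n % |d| (asymptotically faster; return-value equivalence, d ≠ 0).

-- ===== PORT A =====
-- A's 'while True' loop. The fuel argument only makes the recursion total in Lean:
-- the supplied fuel (n mod |d| + 1) exceeds the number of iterations whenever d ≠ 0
-- (proved in wpLoop_eq below), and Python raises ZeroDivisionError at d = 0 (excluded by Pre_).
def wpLoop (d : Int) (n i : Int) : Nat → List Int
  | 0 => []
  | fuel + 1 =>
    if PySem.Int.mod n d = 0 then [PySem.Int.floordiv n d, i, d]
    else wpLoop d (n - 1) (i + 1) fuel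

def whole_part (nominator : Int) (denominator : Int) : List Int :=
  if denominator = 0 then []  -- unreachable under Pre_ (Python raises ZeroDivisionError)
  else wpLoop denominator nominator 0 ((nominator % |denominator|).toNat + 1)

-- ===== PORT B =====
def whole_part_alt (nominator : Int) (denominator : Int) : List Int :=
  if denominator = 0 then []  -- unreachable under Pre_ (Python raises ZeroDivisionError)
  else
    let i := PySem.Int.mod nominator |denominator|
    [PySem.Int.floordiv (nominator - i) denominator, i, denominator]

-- ===== PRECONDITION & SPEC =====
-- Pre_ excludes only denominator = 0, on which Python A raises ZeroDivisionError.
def Pre_whole_part (_nominator : Int) (denominator : Int) : Prop := denominator ≠ 0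
instance (nominator : Int) (denominator : Int) : Decidable (Pre_whole_part nominator denominator) := by unfold Pre_whole_part; infer_instance
def pvWitness_whole_part : Int × Int := (17, 5)
def Spec_whole_part (nominator : Int) (denominator : Int) (out : List Int) : Prop := out = whole_part_alt nominator denominator
instance (nominator : Int) (denominator : Int) (out : List Int) : Decidable (Spec_whole_part nominator denominator out) := by unfold Spec_whole_part; infer_instance

-- ===== CLAIM (what is proved, stated in full; the proofs are below) =====
def Claim_equal_whole_part : Prop := ∀ (nominator : Int) (denominator : Int), Dom_whole_part nominator denominator → Pre_whole_part nominator denominator → Spec_whole_part nominator denominator (whole_part nominator denominator)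

-- ===== LEMMAS AND PROOFS =====

-- Characterisation of A's loop: it runs exactly (n mod |d|) steps, so any larger fuel suffices.
theorem wpLoop_eq (d : Int) (hd : d ≠ 0) (fuel : Nat) :
    ∀ (n i : Int), (n % |d|).toNat < fuel →
      wpLoop d n i fuel = [PySem.Int.floordiv (n - n % |d|) d, i + n % |d|, d] := by
  have hD : (0 : Int) < |d| := abs_pos.mpr hd
  induction fuel with
  | zero => intro n i h; omega
  | succ fuel ih =>
    intro n i h
    rw [wpLoop]
    by_cases hz : PySem.Int.mod n d = 0
    · have hdvd : |d| ∣ n := (abs_dvd d n).mpr ((PySem.Int.mod_eq_zero_iff_dvd n d).mp hz)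
      have hm0 : n % |d| = 0 := Int.emod_eq_zero_of_dvd hdvd
      rw [if_pos hz, hm0]
      norm_num
    · have hnd : ¬ |d| ∣ n := by
        intro hdvd
        exact hz ((PySem.Int.mod_eq_zero_iff_dvd n d).mpr ((abs_dvd d n).mp hdvd))
      have hr0 : 0 ≤ n % |d| := Int.emod_nonneg n (by omega)
      have hrlt : n % |d| < |d| := Int.emod_lt_of_pos n hD
      have hrne : n % |d| ≠ 0 := fun h0 => hnd (Int.dvd_of_emod_eq_zero h0)
      have h1 : (n - 1) % |d| = (n % |d| - 1 % |d|) % |d| := Int.sub_emod n 1 |d|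
      have h2 : (1 : Int) % |d| = 1 := Int.emod_eq_of_lt (by omega) (by omega)
      have hstep : (n - 1) % |d| = n % |d| - 1 := by
        rw [h1, h2]; exact Int.emod_eq_of_lt (by omega) (by omega)
      rw [if_neg hz, ih (n - 1) (i + 1) (by omega), hstep]
      have e1 : n - 1 - (n % |d| - 1) = n - n % |d| := by ring
      have e2 : i + 1 + (n % |d| - 1) = i + n % |d| := by ring
      rw [e1, e2]

theorem whole_part_spec : Claim_equal_whole_part := by
  intro n d _ hpre
  unfold Spec_whole_part whole_part whole_part_alt
  rw [if_neg hpre, if_neg hpre, wpLoop_eq d hpre _ n 0 (by omega)]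
  have hD : (0 : Int) < |d| := abs_pos.mpr hpre
  have hmod : PySem.Int.mod n |d| = n % |d| := PySem.Int.mod_eq_emod_of_pos (a := n) hD
  simp [hmod]
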